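-- pv_equiv track=rewrite | github.com/Beastislive98/Upgraded-Version-of-BEAST | pattern_analyzer.py | _determine_pattern_direction
-- ===== SOURCE A (Python) =====
-- from typing import Dict, Any, List, Optional, Tuple
--
-- def _determine_pattern_direction(patterns: List[Dict[str, Any]]) -> Optional[str]:
--     """Determine overall direction from patterns"""
--     bullish_patterns = [
--         'hammer', 'inverted_hammer', 'bullish_marubozu', 'bullish_engulfing',
--         'bullish_harami', 'piercing_line', 'morning_star', 'three_white_soldiers',
--         'three_inside_up', 'three_outside_up', 'abandoned_baby_bullish',
--         'rising_three_methods', 'inverse_head_and_shoulders', 'double_bottom',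
--         'ascending_channel', 'rounding_bottom', 'v_bottom', 'gartley', 'bat',
--         'impulse_wave'
--     ]
--
--     bearish_patterns = [
--         'hanging_man', 'shooting_star', 'bearish_marubozu', 'bearish_engulfing',
--         'bearish_harami', 'dark_cloud_cover', 'evening_star', 'three_black_crows',
--         'three_inside_down', 'three_outside_down', 'abandoned_baby_bearish',
--         'falling_three_methods', 'head_and_shoulders', 'double_top',
--         'descending_channel', 'rounding_top', 'inverted_v_top', 'corrective_wave'
--     ]
--
--     bullish_count = sum(1 for p in patterns if p['name'] in bullish_patterns)
--     bearish_count = sum(1 for p in patterns if p['name'] in bearish_patterns)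
--
--     if bullish_count > bearish_count:
--         return 'long'
--     elif bearish_count > bullish_count:
--         return 'short'
--     else:
--         return None
-- ===== SOURCE B (Python) =====
-- from typing import Dict, Any, List, Optional
--
-- _DIRECTION = {
--     'hammer': 1, 'inverted_hammer': 1, 'bullish_marubozu': 1, 'bullish_engulfing': 1,
--     'bullish_harami': 1, 'piercing_line': 1, 'morning_star': 1, 'three_white_soldiers': 1,
--     'three_inside_up': 1, 'three_outside_up': 1, 'abandoned_baby_bullish': 1,
--     'rising_three_methods': 1, 'inverse_head_and_shoulders': 1, 'double_bottom': 1,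
--     'ascending_channel': 1, 'rounding_bottom': 1, 'v_bottom': 1, 'gartley': 1, 'bat': 1,
--     'impulse_wave': 1,
--     'hanging_man': -1, 'shooting_star': -1, 'bearish_marubozu': -1, 'bearish_engulfing': -1,
--     'bearish_harami': -1, 'dark_cloud_cover': -1, 'evening_star': -1, 'three_black_crows': -1,
--     'three_inside_down': -1, 'three_outside_down': -1, 'abandoned_baby_bearish': -1,
--     'falling_three_methods': -1, 'head_and_shoulders': -1, 'double_top': -1,
--     'descending_channel': -1, 'rounding_top': -1, 'inverted_v_top': -1, 'corrective_wave': -1,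
-- }
--
-- def _determine_pattern_direction(patterns: List[Dict[str, Any]]) -> Optional[str]:
--     """Determine overall direction from patterns (single-pass net score)."""
--     score = 0
--     for p in patterns:
--         score += _DIRECTION.get(p['name'], 0)
--     if score > 0:
--         return 'long'
--     if score < 0:
--         return 'short'
--     return None
-- ===== Notes on version B (the rewrite author's own statement) =====
-- stated objective: alternative
-- what changed: Replaces the two counting passes (each scanning a bullish/bearish name list per pattern) by one pass over patterns accumulating a signed net score via a prebuilt name->(+1/-1) direction dict.
-- outside the precondition, e.g. on _determine_pattern_direction([{'x': 'hammer'}]): A raises KeyError, B raises KeyError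
import Mathlib
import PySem

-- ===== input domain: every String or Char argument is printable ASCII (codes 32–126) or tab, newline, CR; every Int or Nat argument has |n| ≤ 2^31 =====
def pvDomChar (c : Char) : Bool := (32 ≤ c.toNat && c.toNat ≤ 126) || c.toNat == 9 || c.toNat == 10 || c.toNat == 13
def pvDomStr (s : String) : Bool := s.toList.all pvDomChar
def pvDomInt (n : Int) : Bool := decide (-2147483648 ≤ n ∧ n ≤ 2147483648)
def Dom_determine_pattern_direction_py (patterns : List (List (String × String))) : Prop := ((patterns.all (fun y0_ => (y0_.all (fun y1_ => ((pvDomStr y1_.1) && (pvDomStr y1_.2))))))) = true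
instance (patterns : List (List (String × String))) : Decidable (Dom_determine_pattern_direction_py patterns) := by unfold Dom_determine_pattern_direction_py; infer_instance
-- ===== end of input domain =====

-- B replaces A's two counting passes over the patterns (each scanning a name list) by a
-- single pass accumulating a signed net score through a prebuilt name->±1 direction dict.


-- ===== PORT A =====
def bullishPatterns : List String :=
  ["hammer", "inverted_hammer", "bullish_marubozu", "bullish_engulfing",
   "bullish_harami", "piercing_line", "morning_star", "three_white_soldiers",
   "three_inside_up", "three_outside_up", "abandoned_baby_bullish",
   "rising_three_methods", "inverse_head_and_shoulders", "double_bottom",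
   "ascending_channel", "rounding_bottom", "v_bottom", "gartley", "bat",
   "impulse_wave"]

def bearishPatterns : List String :=
  ["hanging_man", "shooting_star", "bearish_marubozu", "bearish_engulfing",
   "bearish_harami", "dark_cloud_cover", "evening_star", "three_black_crows",
   "three_inside_down", "three_outside_down", "abandoned_baby_bearish",
   "falling_three_methods", "head_and_shoulders", "double_top",
   "descending_channel", "rounding_top", "inverted_v_top", "corrective_wave"]

def determine_pattern_direction_py (patterns : List (List (String × String))) : Option String :=
  -- sum(1 for p in patterns if p['name'] in bullish_patterns); Pre_ guarantees 'name' is present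
  let bullish_count : Int := patterns.foldl (fun acc p =>
    match (PySem.Dict.mk p).get? "name" with
    | some n => if bullishPatterns.contains n then acc + 1 else acc
    | none => acc) 0
  let bearish_count : Int := patterns.foldl (fun acc p =>
    match (PySem.Dict.mk p).get? "name" with
    | some n => if bearishPatterns.contains n then acc + 1 else acc
    | none => acc) 0
  if bullish_count > bearish_count then some "long"
  else if bearish_count > bullish_count then some "short"
  else none

-- ===== PORT B =====
def directionTable : PySem.Dict String Int :=
  PySem.Dict.mk
    [("hammer", 1), ("inverted_hammer", 1), ("bullish_marubozu", 1), ("bullish_engulfing", 1),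
     ("bullish_harami", 1), ("piercing_line", 1), ("morning_star", 1), ("three_white_soldiers", 1),
     ("three_inside_up", 1), ("three_outside_up", 1), ("abandoned_baby_bullish", 1),
     ("rising_three_methods", 1), ("inverse_head_and_shoulders", 1), ("double_bottom", 1),
     ("ascending_channel", 1), ("rounding_bottom", 1), ("v_bottom", 1), ("gartley", 1), ("bat", 1),
     ("impulse_wave", 1),
     ("hanging_man", -1), ("shooting_star", -1), ("bearish_marubozu", -1), ("bearish_engulfing", -1),
     ("bearish_harami", -1), ("dark_cloud_cover", -1), ("evening_star", -1), ("three_black_crows", -1),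
     ("three_inside_down", -1), ("three_outside_down", -1), ("abandoned_baby_bearish", -1),
     ("falling_three_methods", -1), ("head_and_shoulders", -1), ("double_top", -1),
     ("descending_channel", -1), ("rounding_top", -1), ("inverted_v_top", -1), ("corrective_wave", -1)]

def determine_pattern_direction_py_alt (patterns : List (List (String × String))) : Option String :=
  -- score += _DIRECTION.get(p['name'], 0); Pre_ guarantees 'name' is present
  let score : Int := patterns.foldl (fun s p =>
    match (PySem.Dict.mk p).get? "name" with
    | some n => s + directionTable.getD n 0
    | none => s) 0
  if score > 0 then some "long"
  else if score < 0 then some "short"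
  else none

-- ===== PRECONDITION & SPEC =====
-- Pre_ excludes patterns lacking a "name" key, on which A (p['name']) raises KeyError.
def Pre_determine_pattern_direction_py (patterns : List (List (String × String))) : Prop :=
  patterns.all (fun p => p.any (fun kv => kv.1 == "name")) = true
instance (patterns : List (List (String × String))) : Decidable (Pre_determine_pattern_direction_py patterns) := by unfold Pre_determine_pattern_direction_py; infer_instance
def pvWitness_determine_pattern_direction_py : (List (List (String × String))) :=
  [[("name", "hammer")], [("name", "double_top"), ("conf", "x")]]

def Spec_determine_pattern_direction_py (patterns : List (List (String × String))) (out : Option String) : Prop := out = determine_pattern_direction_py_alt patterns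
instance (patterns : List (List (String × String))) (out : Option String) : Decidable (Spec_determine_pattern_direction_py patterns out) := by unfold Spec_determine_pattern_direction_py; infer_instance

-- ===== CLAIM (what is proved, stated in full; the proofs are below) =====
def Claim_equal_determine_pattern_direction_py : Prop := ∀ (patterns : List (List (String × String))), Dom_determine_pattern_direction_py patterns → Pre_determine_pattern_direction_py patterns → Spec_determine_pattern_direction_py patterns (determine_pattern_direction_py patterns)

-- ===== LEMMAS AND PROOFS =====

-- per-name: the direction table's value is the signed indicator of the two name lists
set_option maxHeartbeats 2000000 in
lemma dir_table_getD (n : String) :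
    directionTable.getD n 0 =
      (if bullishPatterns.contains n then (1 : Int) else 0)
      - (if bearishPatterns.contains n then (1 : Int) else 0) := by
  simp only [directionTable, PySem.Dict.getD, PySem.Dict.get?_mk_cons]
  rcases eq_or_ne n "hammer" with rfl | h0
  · decide
  rcases eq_or_ne n "inverted_hammer" with rfl | h1
  · decide
  rcases eq_or_ne n "bullish_marubozu" with rfl | h2
  · decide
  rcases eq_or_ne n "bullish_engulfing" with rfl | h3
  · decide
  rcases eq_or_ne n "bullish_harami" with rfl | h4
  · decide
  rcases eq_or_ne n "piercing_line" with rfl | h5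
  · decide
  rcases eq_or_ne n "morning_star" with rfl | h6
  · decide
  rcases eq_or_ne n "three_white_soldiers" with rfl | h7
  · decide
  rcases eq_or_ne n "three_inside_up" with rfl | h8
  · decide
  rcases eq_or_ne n "three_outside_up" with rfl | h9
  · decide
  rcases eq_or_ne n "abandoned_baby_bullish" with rfl | h10
  · decide
  rcases eq_or_ne n "rising_three_methods" with rfl | h11
  · decide
  rcases eq_or_ne n "inverse_head_and_shoulders" with rfl | h12
  · decide
  rcases eq_or_ne n "double_bottom" with rfl | h13
  · decide
  rcases eq_or_ne n "ascending_channel" with rfl | h14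
  · decide
  rcases eq_or_ne n "rounding_bottom" with rfl | h15
  · decide
  rcases eq_or_ne n "v_bottom" with rfl | h16
  · decide
  rcases eq_or_ne n "gartley" with rfl | h17
  · decide
  rcases eq_or_ne n "bat" with rfl | h18
  · decide
  rcases eq_or_ne n "impulse_wave" with rfl | h19
  · decide
  rcases eq_or_ne n "hanging_man" with rfl | h20
  · decide
  rcases eq_or_ne n "shooting_star" with rfl | h21
  · decide
  rcases eq_or_ne n "bearish_marubozu" with rfl | h22
  · decide
  rcases eq_or_ne n "bearish_engulfing" with rfl | h23
  · decide
  rcases eq_or_ne n "bearish_harami" with rfl | h24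
  · decide
  rcases eq_or_ne n "dark_cloud_cover" with rfl | h25
  · decide
  rcases eq_or_ne n "evening_star" with rfl | h26
  · decide
  rcases eq_or_ne n "three_black_crows" with rfl | h27
  · decide
  rcases eq_or_ne n "three_inside_down" with rfl | h28
  · decide
  rcases eq_or_ne n "three_outside_down" with rfl | h29
  · decide
  rcases eq_or_ne n "abandoned_baby_bearish" with rfl | h30
  · decide
  rcases eq_or_ne n "falling_three_methods" with rfl | h31
  · decide
  rcases eq_or_ne n "head_and_shoulders" with rfl | h32
  · decide
  rcases eq_or_ne n "double_top" with rfl | h33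
  · decide
  rcases eq_or_ne n "descending_channel" with rfl | h34
  · decide
  rcases eq_or_ne n "rounding_top" with rfl | h35
  · decide
  rcases eq_or_ne n "inverted_v_top" with rfl | h36
  · decide
  rcases eq_or_ne n "corrective_wave" with rfl | h37
  · decide
  simp [bullishPatterns, bearishPatterns, h0, Ne.symm h0, h1, Ne.symm h1, h2, Ne.symm h2, h3, Ne.symm h3, h4, Ne.symm h4, h5, Ne.symm h5, h6, Ne.symm h6, h7, Ne.symm h7, h8, Ne.symm h8, h9, Ne.symm h9, h10, Ne.symm h10, h11, Ne.symm h11, h12, Ne.symm h12, h13, Ne.symm h13, h14, Ne.symm h14, h15, Ne.symm h15, h16, Ne.symm h16, h17, Ne.symm h17, h18, Ne.symm h18, h19, Ne.symm h19, h20, Ne.symm h20, h21, Ne.symm h21, h22, Ne.symm h22, h23, Ne.symm h23, h24, Ne.symm h24, h25, Ne.symm h25, h26, Ne.symm h26, h27, Ne.symm h27, h28, Ne.symm h28, h29, Ne.symm h29, h30, Ne.symm h30, h31, Ne.symm h31, h32, Ne.symm h32, h33, Ne.symm h33, h34, Ne.symm h34, h35, Ne.symm h35, h36, Ne.symm h36,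 h37, Ne.symm h37, PySem.Dict.get?]

-- the single-pass score equals (bullish count) - (bearish count), any accumulators
lemma score_eq (patterns : List (List (String × String))) (b c : Int) :
    patterns.foldl (fun s p =>
      match (PySem.Dict.mk p).get? "name" with
      | some n => s + directionTable.getD n 0
      | none => s) (b - c)
    = patterns.foldl (fun acc p =>
        match (PySem.Dict.mk p).get? "name" with
        | some n => if bullishPatterns.contains n then acc + 1 else acc
        | none => acc) b
      - patterns.foldl (fun acc p =>
        match (PySem.Dict.mk p).get? "name" with
        | some n => if bearishPatterns.contains n then acc + 1 else acc
        | none => acc) c := by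
  induction patterns generalizing b c with
  | nil => simp
  | cons p rest ih =>
    simp only [List.foldl_cons]
    cases h : (PySem.Dict.mk p).get? "name" with
    | none => exact ih b c
    | some n =>
      dsimp only
      rw [dir_table_getD n]
      by_cases hb : bullishPatterns.contains n = true
      · by_cases hr : bearishPatterns.contains n = true
        · simp only [if_pos hb, if_pos hr]
          have e : b - c + ((1:Int) - 1) = (b+1) - (c+1) := by ring
          rw [e]; exact ih (b+1) (c+1)
        · simp only [if_pos hb, if_neg hr]
          have e : b - c + ((1:Int) - 0) = (b+1) - c := by ring
          rw [e]; exact ih (b+1) c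
      · by_cases hr : bearishPatterns.contains n = true
        · simp only [if_neg hb, if_pos hr]
          have e : b - c + ((0:Int) - 1) = b - (c+1) := by ring
          rw [e]; exact ih b (c+1)
        · simp only [if_neg hb, if_neg hr]
          have e : b - c + ((0:Int) - 0) = b - c := by ring
          rw [e]; exact ih b c

-- ===== VERDICT (by name: the statement is the Claim_ definition above) =====
theorem determine_pattern_direction_py_spec : Claim_equal_determine_pattern_direction_py := by
  intro patterns _ _
  unfold Spec_determine_pattern_direction_py determine_pattern_direction_py determine_pattern_direction_py_alt
  dsimp only
  have h := score_eq patterns 0 0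
  simp only [sub_zero] at h
  rw [h]
  split_ifs <;> first | rfl | omega
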